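-- pv_equiv track=rewrite | github.com/machineagency/duckbot | duckbot/PlatePositionUtils.py | assign_plates_and_wells
-- ===== SOURCE A (Python) =====
-- def assign_plates_and_wells(master_expt_list):
--     plates = [1,2,3,4,5]
--     rows = ["A","B","C","D"]
--     columns = ["1","2","3","4","5","6",]
--
--     platewell_id_list =[]
--     p_index = 0
--     r_index = 0
--     c_index = 0
--     for x in range(len(plates)*len(rows)*len(columns)):
--         platewell_id_list.append("Plate_"+ str(plates[p_index])+"_Well_"+str(rows[r_index])+str(columns[c_index]))
--         c_index = c_index+1
--         if c_index == 6:
--             c_index = 0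
--             r_index = r_index + 1
--         if r_index == 4:
--             r_index = 0
--             p_index = p_index + 1
--
--     for i,x in enumerate(master_expt_list):
--         x["plate_well_id"] = platewell_id_list[i]
--
--
--     for s in master_expt_list:
--         s['Plate'] = s["plate_well_id"][0:7]
--         s['Well'] = s["plate_well_id"][13:16]
--
--     return(master_expt_list)
-- ===== SOURCE B (Python) =====
-- def assign_plates_and_wells(master_expt_list):
--     plates = [1, 2, 3, 4, 5]
--     rows = ["A", "B", "C", "D"]
--     columns = ["1", "2", "3", "4", "5", "6"]
--     for i, x in enumerate(master_expt_list):
--         plate = "Plate_" + str(plates[i // 24])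
--         well = rows[(i // 6) % 4] + columns[i % 6]
--         x["plate_well_id"] = plate + "_Well_" + well
--         x["Plate"] = plate
--         x["Well"] = well
--     return master_expt_list
-- ===== Notes on version B (the rewrite author's own statement) =====
-- stated objective: simpler
-- what changed: Replaced the precomputed 120-entry id list built by an odometer loop plus two extra assignment passes with a single pass that computes each record's plate/row/column components directly from its index (i//24, (i//6)%4, i%6) and builds Plate/Well from those components instead of string slices.
import Mathlib
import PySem

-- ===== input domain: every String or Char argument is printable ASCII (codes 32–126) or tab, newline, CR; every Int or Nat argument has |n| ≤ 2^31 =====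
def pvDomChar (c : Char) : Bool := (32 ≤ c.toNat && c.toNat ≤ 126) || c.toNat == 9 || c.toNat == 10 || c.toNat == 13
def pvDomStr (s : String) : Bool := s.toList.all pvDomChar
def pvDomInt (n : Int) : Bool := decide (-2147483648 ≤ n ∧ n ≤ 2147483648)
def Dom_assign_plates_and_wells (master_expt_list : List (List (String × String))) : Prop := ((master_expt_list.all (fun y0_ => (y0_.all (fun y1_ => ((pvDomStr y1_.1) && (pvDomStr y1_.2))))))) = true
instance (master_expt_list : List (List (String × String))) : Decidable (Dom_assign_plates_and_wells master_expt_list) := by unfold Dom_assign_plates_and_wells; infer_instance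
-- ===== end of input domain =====

-- B replaces A's precomputed 120-entry id list (odometer loop) and two extra passes by one pass
-- computing plate/row/column from the record index; equivalence is about the RETURN value (the
-- Python functions also mutate the record dicts in place, identically).

-- shared table constants and dict primitives (Python dict = assoc list, overwrite in place)
def pvPlates : List Int := [1, 2, 3, 4, 5]
def pvRows : List String := ["A", "B", "C", "D"]
def pvCols : List String := ["1", "2", "3", "4", "5", "6"]
def pvDinsert (d : List (String × String)) (k v : String) : List (String × String) :=
  ((PySem.Dict.mk d).insert k v).items
def pvDget (d : List (String × String)) (k : String) : String :=
  (PySem.Dict.mk d).getD k ""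

-- ===== PORT A =====
-- odometer loop body (indices always in range over the fixed 120 iterations, so getD never defaults)
def pvIdStep (st : List String × Int × Int × Int) (_x : Int) : List String × Int × Int × Int :=
  match st with
  | (acc, p, r, c) =>
    let acc := acc ++ ["Plate_" ++ PySem.Int.toStr ((PySem.List.pyGet? pvPlates p).getD 0)
                        ++ "_Well_" ++ ((PySem.List.pyGet? pvRows r).getD "")
                        ++ ((PySem.List.pyGet? pvCols c).getD "")]
    let c := c + 1
    let (c, r) := if c = 6 then ((0 : Int), r + 1) else (c, r)
    let (r, p) := if r = 4 then ((0 : Int), p + 1) else (r, p)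
    (acc, p, r, c)

def pvIds : List String :=
  ((PySem.List.pyRange 0 (PySem.List.len pvPlates * PySem.List.len pvRows * PySem.List.len pvCols) 1).foldl
    pvIdStep ([], 0, 0, 0)).1

-- platewell_id_list[i] raises IndexError for i ≥ 120: those inputs are excluded by Pre_ (getD "" is unreachable inside Pre_)
def assign_plates_and_wells (master_expt_list : List (List (String × String))) : List (List (String × String)) :=
  let l2 := (PySem.List.enumerate master_expt_list 0).map
    (fun ix => pvDinsert ix.2 "plate_well_id" ((PySem.List.pyGet? pvIds ix.1).getD ""))
  l2.map (fun s =>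
    let s1 := pvDinsert s "Plate" (PySem.Str.slice (pvDget s "plate_well_id") (some 0) (some 7))
    pvDinsert s1 "Well" (PySem.Str.slice (pvDget s1 "plate_well_id") (some 13) (some 16)))

-- ===== PORT B =====
-- plates[i//24] raises IndexError for i ≥ 120, excluded by Pre_ (getD 0 unreachable inside Pre_)
def assign_plates_and_wells_alt (master_expt_list : List (List (String × String))) : List (List (String × String)) :=
  (PySem.List.enumerate master_expt_list 0).map (fun ix =>
    let i := ix.1
    let plate := "Plate_" ++ PySem.Int.toStr ((PySem.List.pyGet? pvPlates (PySem.Int.floordiv i 24)).getD 0)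
    let well := ((PySem.List.pyGet? pvRows (PySem.Int.mod (PySem.Int.floordiv i 6) 4)).getD "")
                ++ ((PySem.List.pyGet? pvCols (PySem.Int.mod i 6)).getD "")
    pvDinsert (pvDinsert (pvDinsert ix.2 "plate_well_id" (plate ++ "_Well_" ++ well)) "Plate" plate) "Well" well)

-- ===== PRECONDITION & SPEC =====
-- With more than 120 records both Pythons raise IndexError (A at platewell_id_list[i], B at plates[i//24]).
def Pre_assign_plates_and_wells (master_expt_list : List (List (String × String))) : Prop :=
  master_expt_list.length ≤ 120
instance (master_expt_list : List (List (String × String))) : Decidable (Pre_assign_plates_and_wells master_expt_list) := by unfold Pre_assign_plates_and_wells; infer_instance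
def pvWitness_assign_plates_and_wells : (List (List (String × String))) := [[("id", "7")], []]

def Spec_assign_plates_and_wells (master_expt_list : List (List (String × String))) (out : List (List (String × String))) : Prop := out = assign_plates_and_wells_alt master_expt_list
instance (master_expt_list : List (List (String × String))) (out : List (List (String × String))) : Decidable (Spec_assign_plates_and_wells master_expt_list out) := by unfold Spec_assign_plates_and_wells; infer_instance

-- ===== CLAIM (what is proved, stated in full; the proofs are below) =====
def Claim_equal_assign_plates_and_wells : Prop := ∀ (master_expt_list : List (List (String × String))), Dom_assign_plates_and_wells master_expt_list → Pre_assign_plates_and_wells master_expt_list → Spec_assign_plates_and_wells master_expt_list (assign_plates_and_wells master_expt_list)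

-- ===== LEMMAS AND PROOFS =====

-- the 120 index-string facts connecting A's precomputed table to B's per-index components
set_option maxRecDepth 40000 in
theorem pvIds_facts : ∀ n : Fin 120,
    let i : Int := (n : Nat)
    let plate := "Plate_" ++ PySem.Int.toStr ((PySem.List.pyGet? pvPlates (PySem.Int.floordiv i 24)).getD 0)
    let well := ((PySem.List.pyGet? pvRows (PySem.Int.mod (PySem.Int.floordiv i 6) 4)).getD "")
                ++ ((PySem.List.pyGet? pvCols (PySem.Int.mod i 6)).getD "")
    (PySem.List.pyGet? pvIds i).getD "" = plate ++ "_Well_" ++ well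
      ∧ PySem.Str.slice (plate ++ "_Well_" ++ well) (some 0) (some 7) = plate
      ∧ PySem.Str.slice (plate ++ "_Well_" ++ well) (some 13) (some 16) = well := by
  decide

theorem pvDget_dinsert_self (d : List (String × String)) (k v : String) :
    pvDget (pvDinsert d k v) k = v := by
  show ((PySem.Dict.mk d).insert k v).getD k "" = v
  exact PySem.Dict.getD_insert_self _ _ _ _

theorem pvDget_dinsert_ne (d : List (String × String)) (k k' v : String) (h : k' ≠ k) :
    pvDget (pvDinsert d k v) k' = pvDget d k' := by
  show ((PySem.Dict.mk d).insert k v).getD k' "" = (PySem.Dict.mk d).getD k' ""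
  exact PySem.Dict.getD_insert_of_ne _ _ _ h

-- ===== VERDICT (by name: the statement is the Claim_ definition above) =====
theorem assign_plates_and_wells_spec : Claim_equal_assign_plates_and_wells := by
  intro l _hdom hpre
  unfold Spec_assign_plates_and_wells assign_plates_and_wells assign_plates_and_wells_alt
  rw [List.map_map]
  apply List.map_congr_left
  intro p hp
  obtain ⟨k, hk, rfl⟩ := (PySem.List.mem_enumerate_iff _ _ _).mp hp
  have hk120 : k < 120 := lt_of_lt_of_le hk hpre
  have hfacts := pvIds_facts ⟨k, hk120⟩
  simp only at hfacts
  obtain ⟨h1, h2, h3⟩ := hfacts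
  simp only [Function.comp, zero_add]
  rw [h1, pvDget_dinsert_self]
  rw [pvDget_dinsert_ne _ _ _ _ (by decide), pvDget_dinsert_self]
  rw [h2, h3]
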